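-- pv_equiv track=rewrite | github.com/SunJINM/doc-ocr | src/question_extraction/question_merger.py | _calculate_merged_bbox
-- ===== SOURCE A (Python) =====
-- from typing import List, Dict, Any, Optional
--
-- def _calculate_merged_bbox(
--
--     text_bbox: List[int],
--     image_bboxes: List[List[int]]
-- ) -> List[int]:
--     """计算合并后的完整题目坐标框（最小外接矩形）"""
--     all_bboxes = [text_bbox] + image_bboxes
--
--     x1 = min(bbox[0] for bbox in all_bboxes if len(bbox) == 4)
--     y1 = min(bbox[1] for bbox in all_bboxes if len(bbox) == 4)
--     x2 = max(bbox[2] for bbox in all_bboxes if len(bbox) == 4)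
--     y2 = max(bbox[3] for bbox in all_bboxes if len(bbox) == 4)
--
--     return [x1, y1, x2, y2]
-- ===== SOURCE B (Python) =====
-- from typing import List
--
-- def _merge(boxes):
--     """Recursive divide-and-conquer merge of a nonempty list of 4-bboxes."""
--     if len(boxes) == 1:
--         b = boxes[0]
--         return [b[0], b[1], b[2], b[3]]
--     mid = len(boxes) // 2
--     l = _merge(boxes[:mid])
--     r = _merge(boxes[mid:])
--     return [min(l[0], r[0]), min(l[1], r[1]),
--             max(l[2], r[2]), max(l[3], r[3])]
--
-- def _calculate_merged_bbox(
--     text_bbox: List[int],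
--     image_bboxes: List[List[int]]
-- ) -> List[int]:
--     """Divide and conquer: split the valid bboxes in halves, merge recursively."""
--     valid = [b for b in [text_bbox] + image_bboxes if len(b) == 4]
--     if not valid:
--         raise ValueError("no valid bbox")
--     return _merge(valid)
-- ===== Notes on version B (the rewrite author's own statement) =====
-- stated objective: alternative
-- what changed: Replaces A's four flat generator scans (one min()/max() per coordinate) by a recursive divide-and-conquer: split the valid bbox list in halves, merge each half into one bbox recursively, and combine the two resulting bboxes; correct because min/max are associative and commutative.
import Mathlib
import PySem

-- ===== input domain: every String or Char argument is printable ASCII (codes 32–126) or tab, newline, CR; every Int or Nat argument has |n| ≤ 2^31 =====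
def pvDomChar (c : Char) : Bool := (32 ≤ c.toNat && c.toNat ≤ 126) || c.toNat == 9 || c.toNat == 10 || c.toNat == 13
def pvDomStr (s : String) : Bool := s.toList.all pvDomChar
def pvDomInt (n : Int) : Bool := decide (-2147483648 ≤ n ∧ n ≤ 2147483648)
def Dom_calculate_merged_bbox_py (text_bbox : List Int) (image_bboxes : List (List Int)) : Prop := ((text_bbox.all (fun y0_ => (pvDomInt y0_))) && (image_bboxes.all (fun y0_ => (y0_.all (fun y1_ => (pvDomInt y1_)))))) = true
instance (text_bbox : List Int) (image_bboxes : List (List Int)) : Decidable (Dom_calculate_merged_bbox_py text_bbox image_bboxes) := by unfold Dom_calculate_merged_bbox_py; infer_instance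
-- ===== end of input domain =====

-- B replaces A's four flat min/max scans by a recursive divide-and-conquer merge of the valid
-- bbox list (objective: alternative, not faster).

-- ===== PORT A =====
-- 'min(bbox[i] for bbox in all_bboxes if len(bbox) == 4)': filter, project (index exact: length is 4), take the extremum.
def pvSel (all : List (List Int)) (i : Int) : List Int :=
  (all.filter (fun b => b.length == 4)).map (fun b => PySem.List.pyGetD b i 0)

def calculate_merged_bbox_py (text_bbox : List Int) (image_bboxes : List (List Int)) : List Int :=
  let all_bboxes := text_bbox :: image_bboxes
  match PySem.List.min? (pvSel all_bboxes 0) (fun x => x),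
        PySem.List.min? (pvSel all_bboxes 1) (fun x => x),
        PySem.List.max? (pvSel all_bboxes 2) (fun x => x),
        PySem.List.max? (pvSel all_bboxes 3) (fun x => x) with
  | some x1, some y1, some x2, some y2 => [x1, y1, x2, y2]
  | _, _, _, _ => []    -- Python raises ValueError here (no valid bbox); excluded by Pre_

-- ===== PORT B =====
-- b[i] on the length-4 bboxes reached here is exact as pyGetD (index always in range).
def pvBoxGet (b : List Int) (i : Int) : Int := PySem.List.pyGetD b i 0

-- the return line of _merge: combine two merged bboxes coordinatewise
def pvCombine (l r : List Int) : List Int :=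
  [min (pvBoxGet l 0) (pvBoxGet r 0), min (pvBoxGet l 1) (pvBoxGet r 1),
   max (pvBoxGet l 2) (pvBoxGet r 2), max (pvBoxGet l 3) (pvBoxGet r 3)]

def pvMerge : List (List Int) → List Int
  | [] => []            -- unreachable: _merge is only called on nonempty lists
  | [b] => [pvBoxGet b 0, pvBoxGet b 1, pvBoxGet b 2, pvBoxGet b 3]
  | a :: b :: rest =>    -- mid = len(boxes) // 2
    pvCombine (pvMerge ((a :: b :: rest).take ((a :: b :: rest).length / 2)))
              (pvMerge ((a :: b :: rest).drop ((a :: b :: rest).length / 2)))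
  termination_by l => l.length
  decreasing_by
    · simp only [List.length_take, List.length_cons]; omega
    · simp only [List.length_drop, List.length_cons]; omega

def calculate_merged_bbox_py_alt (text_bbox : List Int) (image_bboxes : List (List Int)) : List Int :=
  let valid := (text_bbox :: image_bboxes).filter (fun b => b.length == 4)
  match valid with
  | [] => []            -- B raises ValueError here; excluded by Pre_
  | b0 :: rest => pvMerge (b0 :: rest)

-- ===== PRECONDITION & SPEC =====
-- Pre_ excludes exactly the inputs where no bbox has length 4: there A raises ValueError (min() of
-- an empty generator) and B raises ValueError as well.
def Pre_calculate_merged_bbox_py (text_bbox : List Int) (image_bboxes : List (List Int)) : Prop :=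
  ((text_bbox :: image_bboxes).any (fun b => b.length == 4)) = true
instance (text_bbox : List Int) (image_bboxes : List (List Int)) : Decidable (Pre_calculate_merged_bbox_py text_bbox image_bboxes) := by unfold Pre_calculate_merged_bbox_py; infer_instance

def pvWitness_calculate_merged_bbox_py : List Int × List (List Int) := ([1, 2, 3, 4], [[0, 5, 6, 7]])

def Spec_calculate_merged_bbox_py (text_bbox : List Int) (image_bboxes : List (List Int)) (out : List Int) : Prop := out = calculate_merged_bbox_py_alt text_bbox image_bboxes
instance (text_bbox : List Int) (image_bboxes : List (List Int)) (out : List Int) : Decidable (Spec_calculate_merged_bbox_py text_bbox image_bboxes out) := by unfold Spec_calculate_merged_bbox_py; infer_instance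

-- ===== CLAIM (what is proved, stated in full; the proofs are below) =====
def Claim_equal_calculate_merged_bbox_py : Prop := ∀ (text_bbox : List Int) (image_bboxes : List (List Int)), Dom_calculate_merged_bbox_py text_bbox image_bboxes → Pre_calculate_merged_bbox_py text_bbox image_bboxes → Spec_calculate_merged_bbox_py text_bbox image_bboxes (calculate_merged_bbox_py text_bbox image_bboxes)

-- ===== LEMMAS AND PROOFS =====

-- running extremum of a nonempty list (the value A's min()/max() computes)
def pvRun (op : Int → Int → Int) : List Int → Int
  | [] => 0
  | x :: xs => xs.foldl op x

theorem foldl_op_pull (op : Int → Int → Int)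
    (hassoc : ∀ a b c, op (op a b) c = op a (op b c)) (m : Int) (ys : List Int) :
    ∀ y, ys.foldl op (op m y) = op m (ys.foldl op y) := by
  induction ys with
  | nil => intro y; rfl
  | cons z zs ih => intro y; simp only [List.foldl_cons, hassoc]; exact ih _

theorem pvRun_append (op : Int → Int → Int)
    (hassoc : ∀ a b c, op (op a b) c = op a (op b c))
    (xs ys : List Int) (hx : xs ≠ []) (hy : ys ≠ []) :
    pvRun op (xs ++ ys) = op (pvRun op xs) (pvRun op ys) := by
  obtain ⟨x, xs', rfl⟩ := List.exists_cons_of_ne_nil hx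
  obtain ⟨y, ys', rfl⟩ := List.exists_cons_of_ne_nil hy
  simp only [pvRun, List.cons_append, List.foldl_cons, List.foldl_append]
  exact foldl_op_pull op hassoc _ _ _

theorem pvBoxGet_0 (x1 y1 x2 y2 : Int) : pvBoxGet [x1, y1, x2, y2] 0 = x1 := rfl
theorem pvBoxGet_1 (x1 y1 x2 y2 : Int) : pvBoxGet [x1, y1, x2, y2] 1 = y1 := rfl
theorem pvBoxGet_2 (x1 y1 x2 y2 : Int) : pvBoxGet [x1, y1, x2, y2] 2 = x2 := rfl
theorem pvBoxGet_3 (x1 y1 x2 y2 : Int) : pvBoxGet [x1, y1, x2, y2] 3 = y2 := rfl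

-- pvMerge on a nonempty list computes the four running extrema of the projections
theorem pvMerge_eq : ∀ (l : List (List Int)), l ≠ [] →
    pvMerge l = [pvRun min (l.map (fun b => pvBoxGet b 0)),
                 pvRun min (l.map (fun b => pvBoxGet b 1)),
                 pvRun max (l.map (fun b => pvBoxGet b 2)),
                 pvRun max (l.map (fun b => pvBoxGet b 3))] := by
  intro l
  induction l using pvMerge.induct with
  | case1 => intro h; exact absurd rfl h
  | case2 b => intro _; simp [pvMerge, pvRun]
  | case3 a b rest ih1 ih2 =>
    intro _
    have htake : (a :: b :: rest).take ((a :: b :: rest).length / 2) ≠ [] := by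
      simp only [← List.length_pos_iff, List.length_take, List.length_cons]; omega
    have hdrop : (a :: b :: rest).drop ((a :: b :: rest).length / 2) ≠ [] := by
      simp only [← List.length_pos_iff, List.length_drop, List.length_cons]; omega
    have hsplit : ∀ (g : List Int → Int) (op : Int → Int → Int),
        (∀ a b c : Int, op (op a b) c = op a (op b c)) →
        op (pvRun op (((a :: b :: rest).take ((a :: b :: rest).length / 2)).map g))
           (pvRun op (((a :: b :: rest).drop ((a :: b :: rest).length / 2)).map g))
        = pvRun op ((a :: b :: rest).map g) := by
      intro g op hop
      rw [← pvRun_append op hop _ _ (by simpa using htake) (by simpa using hdrop),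
          ← List.map_append, List.take_append_drop]
    rw [pvMerge, ih1 htake, ih2 hdrop]
    simp only [pvCombine, pvBoxGet_0, pvBoxGet_1, pvBoxGet_2, pvBoxGet_3]
    rw [hsplit _ min (fun a b c => min_assoc a b c),
        hsplit _ min (fun a b c => min_assoc a b c),
        hsplit _ max (fun a b c => max_assoc a b c),
        hsplit _ max (fun a b c => max_assoc a b c)]

-- ===== VERDICT (by name: the statement is the Claim_ definition above) =====
theorem calculate_merged_bbox_py_spec : Claim_equal_calculate_merged_bbox_py := by
  intro tb ibs _ hpre
  have hvalid : (tb :: ibs).filter (fun b => b.length == 4) ≠ [] := by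
    unfold Pre_calculate_merged_bbox_py at hpre
    simp only [List.any_eq_true] at hpre
    obtain ⟨b, hb, h4⟩ := hpre
    intro h
    exact (List.filter_eq_nil_iff.mp h) b hb h4
  obtain ⟨b0, rest, hv⟩ := List.exists_cons_of_ne_nil hvalid
  have hB : calculate_merged_bbox_py_alt tb ibs = pvMerge (b0 :: rest) := by
    unfold calculate_merged_bbox_py_alt
    rw [hv]
  unfold Spec_calculate_merged_bbox_py
  rw [hB, pvMerge_eq (b0 :: rest) (by simp)]
  unfold calculate_merged_bbox_py pvSel
  simp only [hv, List.map_cons, PySem.List.min?_id_cons, PySem.List.max?_id_cons, pvRun, pvBoxGet]
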